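-- pv_equiv track=rewrite | github.com/nikhilgowda123/AdaptiveUserScheduleEnhancer | PreProcessingEventData.py | get_start_date_end_date
-- ===== SOURCE A (Python) =====
-- def get_start_date_end_date(date_range):
--     data_value = []
--     get_split_str = str(date_range).split("-")
--     for str_splits in get_split_str:
--         val = str_splits.split(",")
--         for ele in val:
--             temp = ele.split(" ")
--             for t in temp:
--                 if t.__contains__(":"):
--                     data_value.append(t.replace("IST", ""))
--     if (len(data_value) == 0):
--         return None
--     else:
--         return data_value
-- ===== SOURCE B (Python) =====
-- def get_start_date_end_date(date_range):
--     # single left-to-right character scan instead of three nested split loops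
--     out = []
--     token = []
--     for ch in str(date_range) + "-":
--         if ch in "-, ":
--             t = "".join(token)
--             if ":" in t:
--                 out.append(t.replace("IST", ""))
--             token = []
--         else:
--             token.append(ch)
--     return out if out else None
-- ===== Notes on version B (the rewrite author's own statement) =====
-- stated objective: simpler
-- what changed: Replaces the three nested split loops (split on '-', then ',', then ' ') with a single left-to-right character scan that cuts tokens at any of the three delimiters and flushes time-like tokens as it goes.
import Mathlib
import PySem

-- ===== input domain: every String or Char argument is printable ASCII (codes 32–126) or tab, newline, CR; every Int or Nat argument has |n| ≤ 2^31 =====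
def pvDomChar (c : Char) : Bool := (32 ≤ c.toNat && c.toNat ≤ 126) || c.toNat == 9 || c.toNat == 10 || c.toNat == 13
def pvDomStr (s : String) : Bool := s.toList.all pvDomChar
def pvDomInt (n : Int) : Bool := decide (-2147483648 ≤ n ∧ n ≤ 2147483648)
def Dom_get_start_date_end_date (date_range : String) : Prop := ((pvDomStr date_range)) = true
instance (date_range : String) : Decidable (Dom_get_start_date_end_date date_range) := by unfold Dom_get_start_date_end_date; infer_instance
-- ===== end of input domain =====

-- B replaces A's three nested split loops by one left-to-right character scan (objective: simpler).

-- ===== PORT A =====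
-- literal transliteration of A: split on "-", each piece on ",", each on " ",
-- collect tokens containing ":" with "IST" removed; string ops on the List Char side per PySem.
def get_start_date_end_date (date_range : String) : Option (List String) :=
  let data_value :=
    (PySem.Chars.splitOn date_range.toList "-".toList).foldl (fun dv str_splits =>
      (PySem.Chars.splitOn str_splits ",".toList).foldl (fun dv ele =>
        (PySem.Chars.splitOn ele " ".toList).foldl (fun dv t =>
          if PySem.Chars.isIn ":".toList t then
            dv ++ [String.ofList (PySem.Chars.replace t "IST".toList "".toList)]
          else dv) dv) dv) ([] : List String)
  if data_value.length = 0 then none else some data_value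

-- ===== PORT B =====
-- flush the finished token: keep it (with "IST" removed) iff it contains ":"
def pvFlush (out : List String) (token : List Char) : List String :=
  if PySem.Chars.isIn ":".toList token then
    out ++ [String.ofList (PySem.Chars.replace token "IST".toList "".toList)]
  else out

-- the scan of Source B: cut at '-', ',' or ' ', otherwise grow the current token
def pvScan : List Char → List String → List Char → List String
  | [], out, _ => out
  | c :: cs, out, token =>
    if c = '-' ∨ c = ',' ∨ c = ' ' then pvScan cs (pvFlush out token) []
    else pvScan cs out (token ++ [c])

def get_start_date_end_date_alt (date_range : String) : Option (List String) :=
  let out := pvScan (date_range.toList ++ ['-']) [] []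
  if out.isEmpty then none else some out

-- ===== PRECONDITION & SPEC =====
def Spec_get_start_date_end_date (date_range : String) (out : Option (List String)) : Prop := out = get_start_date_end_date_alt date_range
instance (date_range : String) (out : Option (List String)) : Decidable (Spec_get_start_date_end_date date_range out) := by unfold Spec_get_start_date_end_date; infer_instance

-- ===== CLAIM (what is proved, stated in full; the proofs are below) =====
def Claim_equal_get_start_date_end_date : Prop := ∀ (date_range : String), Dom_get_start_date_end_date date_range → Spec_get_start_date_end_date date_range (get_start_date_end_date date_range)

-- ===== LEMMAS AND PROOFS =====

-- tokenization of a character list at a set S of single-character delimiters (empty pieces kept)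
def pvDt (S : List Char) : List Char → List (List Char)
  | [] => [[]]
  | c :: cs => if c ∈ S then [] :: pvDt S cs else (pvDt S cs).modifyHead (c :: ·)

theorem pvDt_ne_nil (S : List Char) (cs : List Char) : pvDt S cs ≠ [] := by
  cases cs with
  | nil => simp [pvDt]
  | cons c cs =>
    simp only [pvDt]
    split
    · simp
    · cases h : pvDt S cs with
      | nil => exact absurd h (pvDt_ne_nil S cs)
      | cons p ps => simp

theorem pvModifyHead_id (l : List (List Char)) : l.modifyHead (fun x => x) = l := by
  cases l <;> simp

theorem pvModifyHead_comp (f g : List Char → List Char) (l : List (List Char)) :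
    (l.modifyHead g).modifyHead f = l.modifyHead (fun x => f (g x)) := by
  cases l <;> simp

theorem pvModifyHead_append (f : List Char → List Char) (l r : List (List Char)) (h : l ≠ []) :
    (l.modifyHead f) ++ r = (l ++ r).modifyHead f := by
  cases l with
  | nil => exact absurd rfl h
  | cons p ps => simp

theorem pvDt_no_delim (S : List Char) (t : List Char) (h : ∀ c ∈ t, c ∉ S) :
    pvDt S t = [t] := by
  induction t with
  | nil => rfl
  | cons c cs ih =>
    have hc : c ∉ S := h c (by simp)
    simp [pvDt, if_neg hc, ih (fun x hx => h x (by simp [hx]))]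

theorem pvDt_append_no_delim (S : List Char) (t cs : List Char) (h : ∀ c ∈ t, c ∉ S) :
    pvDt S (t ++ cs) = (pvDt S cs).modifyHead (t ++ ·) := by
  induction t with
  | nil => simp [pvModifyHead_id]
  | cons c t' ih =>
    have hc : c ∉ S := h c (by simp)
    simp only [List.cons_append, pvDt, if_neg hc, ih (fun x hx => h x (by simp [hx])),
      pvModifyHead_comp]

theorem pvFlatMap_dt (c : Char) (S : List Char) (hc : c ∉ S) (cs : List Char) :
    (pvDt [c] cs).flatMap (pvDt S) = pvDt (c :: S) cs := by
  induction cs with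
  | nil => simp [pvDt]
  | cons ch cs ih =>
    by_cases hch : ch = c
    · subst hch
      simp only [pvDt, if_pos (by simp : ch ∈ [ch]), if_pos (by simp : ch ∈ ch :: S)]
      simp [ih]
      rfl
    · obtain ⟨p, ps, hps⟩ : ∃ p ps, pvDt [c] cs = p :: ps := by
        cases h : pvDt [c] cs with
        | nil => exact absurd h (pvDt_ne_nil _ _)
        | cons p ps => exact ⟨p, ps, rfl⟩
      have hIH : pvDt S p ++ ps.flatMap (pvDt S) = pvDt (c :: S) cs := by
        rw [← ih, hps]; simp
      by_cases hchS : ch ∈ S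
      · simp only [pvDt, if_neg (by simp [hch] : ch ∉ [c]),
          if_pos (by simp [hchS] : ch ∈ c :: S), hps, List.modifyHead_cons]
        simp only [List.flatMap_cons, pvDt, if_pos hchS]
        rw [← hIH]; simp
      · simp only [pvDt, if_neg (by simp [hch] : ch ∉ [c]),
          if_neg (by simp [hch, hchS] : ch ∉ c :: S), hps, List.modifyHead_cons]
        simp only [List.flatMap_cons, pvDt, if_neg hchS]
        rw [pvModifyHead_append _ _ _ (pvDt_ne_nil S p), hIH]

theorem pvGo_single (d : Char) (l : List Char) : ∀ (fuel : Nat) (cur : List Char)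
    (acc : List (List Char)), l.length < fuel →
    PySem.Chars.splitOn.go [d] fuel l cur acc
      = acc.reverse ++ (pvDt [d] l).modifyHead (cur.reverse ++ ·) := by
  induction l with
  | nil =>
    intro fuel cur acc h
    match fuel with
    | f + 1 => simp [PySem.Chars.splitOn.go, pvDt]
  | cons c rest ih =>
    intro fuel cur acc h
    have hlen : rest.length < fuel - 1 := by simp at h; omega
    match fuel with
    | f + 1 =>
      have hlen' : rest.length < f := by simpa using hlen
      simp only [PySem.Chars.splitOn.go, List.isPrefixOf,
        Bool.and_true, beq_iff_eq, List.length_cons, List.length_nil, Nat.zero_add,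
        List.drop_succ_cons, List.drop_zero]
      by_cases hdc : d = c
      · subst hdc
        rw [if_pos rfl, ih f [] (cur.reverse :: acc) hlen']
        simp only [pvDt, if_pos (by simp : d ∈ [d])]
        simp [pvModifyHead_id]
      · rw [if_neg hdc, ih f (c :: cur) acc hlen']
        simp only [pvDt, if_neg (by simpa using fun hh => hdc hh.symm : c ∉ [d]),
          pvModifyHead_comp]
        have hfun : (fun x : List Char => (c :: cur).reverse ++ x)
            = (fun x : List Char => cur.reverse ++ (c :: x)) := by
          funext x; simp
        rw [hfun]

theorem pvSplitOn_single (d : Char) (cs : List Char) :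
    PySem.Chars.splitOn cs [d] = pvDt [d] cs := by
  rw [PySem.Chars.splitOn, pvGo_single d cs (cs.length + 1) [] [] (by omega)]
  simp [pvModifyHead_id]

theorem pvFoldl_flatMap {α β γ : Type} (l : List α) (g : α → List β) (f : γ → β → γ) (a : γ) :
    l.foldl (fun a x => (g x).foldl f a) a = (l.flatMap g).foldl f a := by
  induction l generalizing a with
  | nil => rfl
  | cons x xs ih => simp [List.flatMap_cons, List.foldl_append, ih]

theorem pvScan_eq (cs : List Char) : ∀ (out : List String) (token : List Char),
    (∀ c ∈ token, c ∉ ['-', ',', ' ']) →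
    pvScan (cs ++ ['-']) out token
      = (pvDt ['-', ',', ' '] (token ++ cs)).foldl pvFlush out := by
  induction cs with
  | nil =>
    intro out token h
    simp only [List.nil_append, pvScan]
    rw [List.append_nil, pvDt_no_delim _ _ h]
    rfl
  | cons c cs ih =>
    intro out token h
    by_cases hc : c = '-' ∨ c = ',' ∨ c = ' '
    · have hmem : c ∈ ['-', ',', ' '] := by simpa using hc
      simp only [List.cons_append, pvScan, if_pos hc]
      rw [ih (pvFlush out token) [] (by simp)]
      rw [pvDt_append_no_delim _ _ _ h]
      simp only [pvDt, if_pos hmem, List.modifyHead_cons]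
      simp
    · simp only [List.cons_append, pvScan, if_neg hc]
      rw [ih out (token ++ [c]) (by
        intro x hx
        rcases List.mem_append.1 hx with hx | hx
        · exact h x hx
        · simp at hx; subst hx; simpa using hc)]
      rw [List.append_assoc]
      rfl

-- ===== VERDICT (by name: the statement is the Claim_ definition above) =====
theorem get_start_date_end_date_spec : Claim_equal_get_start_date_end_date := by
  intro s _
  unfold Spec_get_start_date_end_date
  simp only [get_start_date_end_date, get_start_date_end_date_alt]
  have hsep1 : "-".toList = ['-'] := rfl
  have hsep2 : ",".toList = [','] := rfl
  have hsep3 : " ".toList = [' '] := rfl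
  have hstep : (fun (dv : List String) (t : List Char) =>
      if PySem.Chars.isIn ":".toList t then
        dv ++ [String.ofList (PySem.Chars.replace t "IST".toList "".toList)]
      else dv) = pvFlush := rfl
  have e1 : ∀ (p : List Char) (dv : List String),
      (pvDt [','] p).foldl (fun dv e => (pvDt [' '] e).foldl pvFlush dv) dv
        = (pvDt [',', ' '] p).foldl pvFlush dv := by
    intro p dv
    rw [pvFoldl_flatMap, pvFlatMap_dt ',' [' '] (by decide)]
  simp only [hsep1, hsep2, hsep3, pvSplitOn_single, hstep, e1]
  rw [pvFoldl_flatMap, pvFlatMap_dt '-' [',', ' '] (by decide)]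
  rw [pvScan_eq s.toList [] [] (by simp)]
  simp only [List.nil_append]
  rcases h : (pvDt ['-', ',', ' '] s.toList).foldl pvFlush [] with _ | _ <;> simp
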